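-- pv_equiv track=rewrite | github.com/caoyu-dev/pystudy | Chapter3/Ljestvica.py | determine_scale
-- ===== SOURCE A (Python) =====
-- def determine_scale(notes):
--     a_minor_main_tones = {'A', 'D', 'E'}
--     c_major_main_tones = {'C', 'F', 'G'}
--
--     # 음표를 마디로 나누기 위한 리스트 초기화
--     measures = []
--     current_measure = []
--
--     # 입력 문자열을 순회
--     for note in notes:
--         if note == '|':
--             # '|' 를 만나면 현재 마디를 마디 리스트에 추가
--             if current_measure:
--                 measures.append(current_measure)
--                 current_measure = []
--         else:
--             # 음표를 현재 마디에 추가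
--             current_measure.append(note)
--
--     # 마지막 마디를 리스트에 추가
--     if current_measure:
--         measures.append(current_measure)
--
--     # 각 마디의 첫 음표 분석을 위해 변수 초기화
--     a_minor_count = 0
--     c_major_count = 0
--     accented_tones = []
--
--     # 각 마디의 첫 음표를 순회
--     for measure in measures:
--         if measure:
--             first_note = measure[0]
--             accented_tones.append(first_note)
--             if first_note in a_minor_main_tones:
--                 a_minor_count += 1
--             if first_note in c_major_main_tones:
--                 c_major_count += 1
--
--     # 결과 결정
--     if a_minor_count == c_major_count:
--         # 주요 음표 갯수가 같으면 마지막 음표로 결정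
--         last_note = notes[-1]
--         if last_note == 'A':
--             return 'A-mol'
--         elif last_note == 'C':
--             return 'C-dur'
--     elif a_minor_count > c_major_count:
--         return 'A-mol'
--     else:
--         return 'C-dur'
-- ===== SOURCE B (Python) =====
-- def determine_scale(notes):
--     a_minor_count = 0
--     c_major_count = 0
--     start_of_measure = True
--     for note in notes:
--         if note == '|':
--             start_of_measure = True
--         elif start_of_measure:
--             if note in {'A', 'D', 'E'}:
--                 a_minor_count += 1
--             if note in {'C', 'F', 'G'}:
--                 c_major_count += 1
--             start_of_measure = False
--     if a_minor_count == c_major_count: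
--         last_note = notes[-1]
--         if last_note == 'A':
--             return 'A-mol'
--         if last_note == 'C':
--             return 'C-dur'
--         return None
--     return 'A-mol' if a_minor_count > c_major_count else 'C-dur'
-- ===== Notes on version B (the rewrite author's own statement) =====
-- stated objective: simpler
-- what changed: Replaces the two-pass list-of-lists measure construction (plus the unused accented_tones list) by a single pass over notes with a start-of-measure boolean flag that counts each measure's first note directly.
import Mathlib
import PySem

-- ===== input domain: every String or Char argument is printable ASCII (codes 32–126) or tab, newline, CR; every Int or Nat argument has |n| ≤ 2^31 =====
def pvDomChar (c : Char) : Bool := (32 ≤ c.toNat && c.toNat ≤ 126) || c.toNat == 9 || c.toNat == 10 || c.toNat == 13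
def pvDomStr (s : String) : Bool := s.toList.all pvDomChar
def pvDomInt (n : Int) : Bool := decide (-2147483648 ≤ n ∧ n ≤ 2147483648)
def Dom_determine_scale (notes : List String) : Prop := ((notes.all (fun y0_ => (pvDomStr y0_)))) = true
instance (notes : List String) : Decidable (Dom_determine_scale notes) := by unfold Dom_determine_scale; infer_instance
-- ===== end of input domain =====

-- B replaces A's two-pass measure list-of-lists (and unused accented_tones) by one pass with a start-of-measure flag; same results (simpler, not faster).


-- ===== PORT A =====
-- step of A's first loop: split notes into measures, carrying (measures, current_measure)
def pvStepA (st : List (List String) × List String) (note : String) :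
    List (List String) × List String :=
  if note = "|" then
    if st.2 ≠ [] then (st.1 ++ [st.2], []) else st
  else (st.1, st.2 ++ [note])

-- step of A's second loop over measures, carrying (a_minor_count, c_major_count, accented_tones)
def pvCountA (st : Int × Int × List String) (measure : List String) :
    Int × Int × List String :=
  match measure with
  | [] => st
  | first_note :: _ =>
    ((if first_note ∈ ["A", "D", "E"] then st.1 + 1 else st.1),
     (if first_note ∈ ["C", "F", "G"] then st.2.1 + 1 else st.2.1),
     st.2.2 ++ [first_note])

def determine_scale (notes : List String) : Option String :=
  let p := notes.foldl pvStepA ([], [])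
  let measures := if p.2 ≠ [] then p.1 ++ [p.2] else p.1
  let counts := measures.foldl pvCountA (0, 0, [])
  if counts.1 = counts.2.1 then
    match PySem.List.pyGet? notes (-1) with   -- notes[-1]; none = IndexError, excluded by Pre_
    | some last_note =>
      if last_note = "A" then some "A-mol"
      else if last_note = "C" then some "C-dur"
      else none
    | none => none
  else if counts.1 > counts.2.1 then some "A-mol" else some "C-dur"

-- ===== PORT B =====
-- step of B's single loop, carrying (a_minor_count, c_major_count, start_of_measure)
def pvStepB (st : Int × Int × Bool) (note : String) : Int × Int × Bool :=
  if note = "|" then (st.1, st.2.1, true)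
  else if st.2.2 then
    ((if note ∈ ["A", "D", "E"] then st.1 + 1 else st.1),
     (if note ∈ ["C", "F", "G"] then st.2.1 + 1 else st.2.1), false)
  else st

def determine_scale_alt (notes : List String) : Option String :=
  let st := notes.foldl pvStepB (0, 0, true)
  if st.1 = st.2.1 then
    match PySem.List.pyGet? notes (-1) with
    | some last_note =>
      if last_note = "A" then some "A-mol"
      else if last_note = "C" then some "C-dur"
      else none
    | none => none
  else if st.1 > st.2.1 then some "A-mol" else some "C-dur"

-- ===== PRECONDITION & SPEC =====
-- Pre_ excludes only the empty list, on which the Python A raises IndexError at notes[-1].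
def Pre_determine_scale (notes : List String) : Prop := notes ≠ []
instance (notes : List String) : Decidable (Pre_determine_scale notes) := by
  unfold Pre_determine_scale; infer_instance
def pvWitness_determine_scale : List String := ["A", "B", "|", "C"]

def Spec_determine_scale (notes : List String) (out : Option String) : Prop :=
  out = determine_scale_alt notes
instance (notes : List String) (out : Option String) : Decidable (Spec_determine_scale notes out) := by
  unfold Spec_determine_scale; infer_instance

-- ===== CLAIM (what is proved, stated in full; the proofs are below) =====
def Claim_equal_determine_scale : Prop :=
  ∀ (notes : List String), Dom_determine_scale notes → Pre_determine_scale notes →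
    Spec_determine_scale notes (determine_scale notes)

-- ===== LEMMAS AND PROOFS =====
-- sums of the first-note indicators over a measure list
def pvSumA : List (List String) → Int
  | [] => 0
  | m :: ms => (match m with
      | [] => 0
      | f :: _ => if f ∈ ["A", "D", "E"] then (1 : Int) else 0) + pvSumA ms

def pvSumC : List (List String) → Int
  | [] => 0
  | m :: ms => (match m with
      | [] => 0
      | f :: _ => if f ∈ ["C", "F", "G"] then (1 : Int) else 0) + pvSumC ms

def pvFin (ms : List (List String)) (cur : List String) : List (List String) :=
  if cur ≠ [] then ms ++ [cur] else ms

lemma pvSumA_append (ms : List (List String)) (m : List String) :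
    pvSumA (ms ++ [m]) = pvSumA ms + pvSumA [m] := by
  induction ms with
  | nil => simp [pvSumA]
  | cons x xs ih => simp [pvSumA, ih]; ring

lemma pvSumC_append (ms : List (List String)) (m : List String) :
    pvSumC (ms ++ [m]) = pvSumC ms + pvSumC [m] := by
  induction ms with
  | nil => simp [pvSumC]
  | cons x xs ih => simp [pvSumC, ih]; ring

-- A's second loop computes exactly the indicator sums in its first two components
lemma countA_eq (ms : List (List String)) (a c : Int) (acc : List String) :
    (ms.foldl pvCountA (a, c, acc)).1 = a + pvSumA ms ∧
    (ms.foldl pvCountA (a, c, acc)).2.1 = c + pvSumC ms := by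
  induction ms generalizing a c acc with
  | nil => simp [pvSumA, pvSumC]
  | cons m rest ih =>
    cases m with
    | nil =>
      simpa [List.foldl, pvCountA, pvSumA, pvSumC] using ih a c acc
    | cons f t =>
      have h := ih (if f ∈ ["A", "D", "E"] then a + 1 else a)
        (if f ∈ ["C", "F", "G"] then c + 1 else c) (acc ++ [f])
      simp only [List.foldl, pvCountA, pvSumA, pvSumC, h.1, h.2]
      constructor <;> split <;> ring

-- main invariant: B's single pass tracks the indicator sums of A's finalized measures
lemma main_inv (notes : List String) :
    ∀ (ms : List (List String)) (cur : List String),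
      notes.foldl pvStepB (pvSumA (pvFin ms cur), pvSumC (pvFin ms cur), cur.isEmpty)
      = (pvSumA (pvFin (notes.foldl pvStepA (ms, cur)).1 (notes.foldl pvStepA (ms, cur)).2),
         pvSumC (pvFin (notes.foldl pvStepA (ms, cur)).1 (notes.foldl pvStepA (ms, cur)).2),
         (notes.foldl pvStepA (ms, cur)).2.isEmpty) := by
  induction notes with
  | nil => intro ms cur; rfl
  | cons note rest ih =>
    intro ms cur
    by_cases hb : note = "|"
    · subst hb
      cases cur with
      | nil =>
        simpa [List.foldl, pvStepA, pvStepB, pvFin] using ih ms []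
      | cons x xs =>
        have h := ih (ms ++ [x :: xs]) []
        simp [List.foldl, pvStepA, pvStepB, pvFin] at h ⊢
        exact h
    · cases cur with
      | nil =>
        have h := ih ms [note]
        simp [List.foldl, pvStepA, pvStepB, pvFin, hb, pvSumA_append, pvSumC_append,
          pvSumA, pvSumC] at h ⊢
        convert h using 3 <;> split <;> simp
      | cons x xs =>
        have h := ih ms (x :: xs ++ [note])
        simp [List.foldl, pvStepA, pvStepB, pvFin, hb, pvSumA_append, pvSumC_append,
          pvSumA, pvSumC] at h ⊢
        exact h

-- ===== VERDICT (by name: the statement is the Claim_ definition above) =====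
theorem determine_scale_spec : Claim_equal_determine_scale := by
  intro notes _ _
  have hB := main_inv notes [] []
  simp [pvFin, pvSumA, pvSumC] at hB
  have hA := countA_eq
    (pvFin (notes.foldl pvStepA ([], [])).1 (notes.foldl pvStepA ([], [])).2) 0 0 []
  simp only [zero_add] at hA
  simp only [pvFin, ne_eq, ite_not] at hA hB
  show determine_scale notes = determine_scale_alt notes
  unfold determine_scale determine_scale_alt
  simp only [ne_eq, ite_not]
  rw [hB, hA.1, hA.2]
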